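-- pv_equiv track=rewrite | github.com/FabBodson/Bac1 | Programmation_de_Base/LabosPRB/labo7/matrice2d.py | extraire_ligne
-- ===== SOURCE A (Python) =====
-- def extraire_ligne(matrice, index):
--     """
--     Cette fonction retourne la ligne à l'index "index". Si la matrice ne contient pas la ligne spécifiée, la
--     liste retournée sera vide.
--     :param matrice: list, liste 2D de nombres entiers (matrice)
--     :param index: int, indice de la ligne à extraire
--     :return: list, liste des nombres contenus dans la ligne "index", ou une liste vide si la matrice ne
--     contient pas la ligne spécifiée
--     """
--
--     ligne_extraction = []
--
--     for i in range(len(matrice)):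
--
--         if i == index:
--             ligne_extraction.append(matrice[i])
--
--         else:
--             continue
--
--
--     return ligne_extraction
-- ===== SOURCE B (Python) =====
-- def extraire_ligne(matrice, index):
--     return [matrice[index]] if 0 <= index < len(matrice) else []
-- ===== Notes on version B (the rewrite author's own statement) =====
-- stated objective: simpler
-- what changed: Replaced the scan over all row indices with a direct bounds check and a single index access.
import Mathlib
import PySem

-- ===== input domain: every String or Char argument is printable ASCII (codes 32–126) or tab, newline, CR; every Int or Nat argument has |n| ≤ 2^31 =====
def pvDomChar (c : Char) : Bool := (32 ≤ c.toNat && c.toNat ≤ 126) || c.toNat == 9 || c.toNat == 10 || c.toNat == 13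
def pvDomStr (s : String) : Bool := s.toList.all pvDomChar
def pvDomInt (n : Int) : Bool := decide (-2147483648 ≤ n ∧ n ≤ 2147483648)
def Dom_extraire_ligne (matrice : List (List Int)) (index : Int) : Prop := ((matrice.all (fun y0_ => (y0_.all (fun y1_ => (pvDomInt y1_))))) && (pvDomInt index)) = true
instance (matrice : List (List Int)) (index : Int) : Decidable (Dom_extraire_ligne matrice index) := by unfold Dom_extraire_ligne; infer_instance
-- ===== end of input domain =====

-- B replaces A's scan over all row indices with a direct bounds check and one index access (simpler).

-- ===== PORT A =====
-- the loop 'for i in range(len(matrice)): if i == index: append matrice[i]' as structural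
-- recursion over the rows with the running loop counter i and the accumulator
def extraire_ligne_go (rows : List (List Int)) (i index : Int) (acc : List (List Int)) : List (List Int) :=
  match rows with
  | [] => acc
  | r :: rs => extraire_ligne_go rs (i + 1) index (if i == index then acc ++ [r] else acc)

def extraire_ligne (matrice : List (List Int)) (index : Int) : List (List Int) :=
  extraire_ligne_go matrice 0 index []

-- ===== PORT B =====
def extraire_ligne_alt (matrice : List (List Int)) (index : Int) : List (List Int) :=
  if 0 ≤ index ∧ index < matrice.length then [matrice.getD index.toNat []] else []

-- ===== PRECONDITION & SPEC =====
def Spec_extraire_ligne (matrice : List (List Int)) (index : Int) (out : List (List Int)) : Prop := out = extraire_ligne_alt matrice index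
instance (matrice : List (List Int)) (index : Int) (out : List (List Int)) : Decidable (Spec_extraire_ligne matrice index out) := by unfold Spec_extraire_ligne; infer_instance

-- ===== CLAIM (what is proved, stated in full; the proofs are below) =====
def Claim_equal_extraire_ligne : Prop := ∀ (matrice : List (List Int)) (index : Int), Dom_extraire_ligne matrice index → Spec_extraire_ligne matrice index (extraire_ligne matrice index)

-- ===== LEMMAS AND PROOFS =====
theorem extraire_ligne_go_eq (index : Int) (rows : List (List Int)) :
    ∀ (i : Int) (acc : List (List Int)),
      extraire_ligne_go rows i index acc =
        acc ++ (if i ≤ index ∧ index < i + rows.length then [rows.getD (index - i).toNat []] else []) := by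
  induction rows with
  | nil =>
    intro i acc
    simp only [extraire_ligne_go, List.length_nil, Nat.cast_zero]
    rw [if_neg (by omega)]
    simp
  | cons r rs ih =>
    intro i acc
    simp only [extraire_ligne_go, ih, List.length_cons, Nat.cast_add, Nat.cast_one, beq_iff_eq]
    by_cases h : i = index
    · subst h
      rw [if_pos rfl, if_neg (by omega), if_pos (by omega)]
      simp
    · rw [if_neg h]
      by_cases h2 : i + 1 ≤ index ∧ index < i + 1 + (rs.length : Int)
      · rw [if_pos h2, if_pos (by omega)]
        have h4 : (index - i).toNat = (index - (i + 1)).toNat + 1 := by omega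
        simp [h4]
      · rw [if_neg h2, if_neg (by omega)]

theorem extraire_ligne_eq_alt (matrice : List (List Int)) (index : Int) :
    extraire_ligne matrice index = extraire_ligne_alt matrice index := by
  unfold extraire_ligne extraire_ligne_alt
  rw [extraire_ligne_go_eq]
  by_cases h : 0 ≤ index ∧ index < (matrice.length : Int)
  · rw [if_pos (by omega), if_pos h]
    simp
  · rw [if_neg (by omega), if_neg h]
    simp

-- ===== VERDICT (by name: the statement is the Claim_ definition above) =====
theorem extraire_ligne_spec : Claim_equal_extraire_ligne := by
  intro matrice index _
  exact extraire_ligne_eq_alt matrice index
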